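-- pv_equiv track=rewrite | github.com/jugoslavjeftenic/osnove-programiranja-python | godina1/semestar1/vezbe08/zadatak07.py | chocolate_eating_competition
-- ===== SOURCE A (Python) =====
-- def chocolate_eating_competition(n, x, y):
--     chocolate_eaters = [0 for _ in range(n)]
--     current_chocolate_eater = 0
--
--     while True:
--         if x > y:
--             x -= y
--         else:
--             y -= x
--         chocolate_eaters[current_chocolate_eater] += 1
--
--         if current_chocolate_eater >= len(chocolate_eaters) - 1:
--             current_chocolate_eater = 0
--         else:
--             current_chocolate_eater += 1
--
--         if x == 0 or y == 0:
--             break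
--
--     return chocolate_eaters
-- ===== SOURCE B (Python) =====
-- def chocolate_eating_competition(n, x, y):
--     # Division-based Euclid: total number of subtraction steps, then the
--     # steps are handed out round-robin in closed form.
--     steps = 0
--     while x > 0 and y > 0:
--         if x > y:
--             steps += x // y
--             x %= y
--         else:
--             steps += y // x
--             y %= x
--     q, r = divmod(steps, n)
--     return [q + 1] * r + [q] * (n - r)
-- ===== Notes on version B (the rewrite author's own statement) =====
-- stated objective: alternative
-- what changed: Replaces the one-subtraction-per-iteration simulation with a division-based Euclid loop for the total step count plus a closed-form round-robin distribution, instead of bumping list cells one subtraction at a time (fewer loop iterations on skewed x/y; not measurably faster on the sampled inputs).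
-- intended difference: On inputs where x <= 0 or y <= 0 (within the precondition: x = 0, y = 0, or the equal-negative pair x = y < 0), A's post-tested loop still records one eating step and returns [1, 0, ...]; B returns all zeros, the intended answer when no bite can be taken. — e.g. on chocolate_eating_competition(2, 0, 5): A returns [1, 0], B returns [0, 0]
import Mathlib
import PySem

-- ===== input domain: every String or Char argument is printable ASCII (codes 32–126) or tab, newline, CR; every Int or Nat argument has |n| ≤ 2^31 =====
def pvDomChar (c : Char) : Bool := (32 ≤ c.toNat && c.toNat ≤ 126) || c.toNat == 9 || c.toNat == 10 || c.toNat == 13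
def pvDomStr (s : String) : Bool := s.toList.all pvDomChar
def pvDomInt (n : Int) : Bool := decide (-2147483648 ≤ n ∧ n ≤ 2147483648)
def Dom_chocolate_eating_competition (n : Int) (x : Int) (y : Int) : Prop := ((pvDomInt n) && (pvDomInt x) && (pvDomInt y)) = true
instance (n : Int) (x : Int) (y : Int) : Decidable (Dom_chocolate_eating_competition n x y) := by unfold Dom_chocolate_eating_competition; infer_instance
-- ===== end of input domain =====

-- B replaces A's one-subtraction-per-iteration simulation by a division-based Euclid
-- loop for the total step count plus a closed-form round-robin distribution (alternative).

-- ===== PORT A =====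
-- fuel only makes A's `while True` total in Lean; within Pre_ it never runs out
def pvALoop : Nat → Int → Int → List Int → Nat → List Int
  | 0, _, _, eaters, _ => eaters
  | fuel+1, x, y, eaters, cur =>
    let x' := if x > y then x - y else x
    let y' := if x > y then y else y - x
    let eaters' := eaters.set cur (eaters.getD cur 0 + 1)
    let cur' := if (cur : Int) ≥ (eaters.length : Int) - 1 then 0 else cur + 1
    if x' = 0 ∨ y' = 0 then eaters' else pvALoop fuel x' y' eaters' cur'

def chocolate_eating_competition (n : Int) (x : Int) (y : Int) : List Int :=
  pvALoop (x.natAbs + y.natAbs + 1) x y (List.replicate n.toNat 0) 0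

-- ===== PORT B =====
-- fuel only makes the while-loop total in Lean; within Pre_ it never runs out
def pvBSteps : Nat → Int → Int → Int → Int
  | 0, _, _, steps => steps
  | fuel+1, x, y, steps =>
    if x > 0 ∧ y > 0 then
      if x > y then pvBSteps fuel (PySem.Int.mod x y) y (steps + PySem.Int.floordiv x y)
      else pvBSteps fuel x (PySem.Int.mod y x) (steps + PySem.Int.floordiv y x)
    else steps

def chocolate_eating_competition_alt (n : Int) (x : Int) (y : Int) : List Int :=
  let steps := pvBSteps (x.natAbs + y.natAbs + 1) x y 0
  let q := PySem.Int.floordiv steps n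
  let r := PySem.Int.mod steps n
  List.replicate r.toNat (q + 1) ++ List.replicate (n - r).toNat q

-- ===== PRECONDITION & SPEC =====
-- Pre_ excludes only inputs on which A never returns: n ≤ 0 (IndexError on the
-- empty eater list) and inputs with a negative amount other than x = y, on which
-- the subtraction loop never reaches 0.
def Pre_chocolate_eating_competition (n : Int) (x : Int) (y : Int) : Prop :=
  1 ≤ n ∧ ((0 ≤ x ∧ 0 ≤ y) ∨ x = y)
instance (n : Int) (x : Int) (y : Int) : Decidable (Pre_chocolate_eating_competition n x y) := by
  unfold Pre_chocolate_eating_competition; infer_instance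

def pvWitness_chocolate_eating_competition : Int × Int × Int := (3, 6, 4)

-- On inputs where x ≤ 0 or y ≤ 0 (within Pre_: x = 0, y = 0, or the equal-negative
-- pair x = y < 0), A's post-tested loop still records one eating step and returns
-- [1, 0, ...]; B returns all zeros, the intended answer when no bite can be taken.
def D_chocolate_eating_competition (n : Int) (x : Int) (y : Int) : Prop := x ≤ 0 ∨ y ≤ 0
instance (n : Int) (x : Int) (y : Int) : Decidable (D_chocolate_eating_competition n x y) := by
  unfold D_chocolate_eating_competition; infer_instance

def Spec_chocolate_eating_competition (n : Int) (x : Int) (y : Int) (out : List Int) : Prop := ¬ D_chocolate_eating_competition n x y → out = chocolate_eating_competition_alt n x y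
instance (n : Int) (x : Int) (y : Int) (out : List Int) : Decidable (Spec_chocolate_eating_competition n x y out) := by unfold Spec_chocolate_eating_competition; infer_instance

def pvDiffWitness_chocolate_eating_competition : Int × Int × Int := (2, 0, 5)
def pvDiffWitnessOut_chocolate_eating_competition : (List Int) × (List Int) := ([1, 0], [0, 0])

-- ===== CLAIM (what is proved, stated in full; the proofs are below) =====
def Claim_unchanged_chocolate_eating_competition : Prop := ∀ (n : Int) (x : Int) (y : Int), Dom_chocolate_eating_competition n x y → Pre_chocolate_eating_competition n x y → Spec_chocolate_eating_competition n x y (chocolate_eating_competition n x y)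
def Claim_changed_chocolate_eating_competition : Prop := Dom_chocolate_eating_competition (pvDiffWitness_chocolate_eating_competition.1) (pvDiffWitness_chocolate_eating_competition.2.1) (pvDiffWitness_chocolate_eating_competition.2.2) ∧ Pre_chocolate_eating_competition (pvDiffWitness_chocolate_eating_competition.1) (pvDiffWitness_chocolate_eating_competition.2.1) (pvDiffWitness_chocolate_eating_competition.2.2) ∧ D_chocolate_eating_competition (pvDiffWitness_chocolate_eating_competition.1) (pvDiffWitness_chocolate_eating_competition.2.1) (pvDiffWitness_chocolate_eating_competition.2.2) ∧ chocolate_eating_competition (pvDiffWitness_chocolate_eating_competition.1) (pvDiffWitness_chocolate_eating_competition.2.1) (pvDiffWitness_chocolate_eating_competition.2.2) = pvDiffWitnessOut_chocolate_eating_competition.1 ∧ chocolate_eating_competition_alt (pvDiffWitness_chocolate_eating_competition.1) (pvDiffWitness_chocolate_eating_competition.2.1) (pvDiffWitness_chocolate_eating_competition.2.2) = pvDiffWitnessOut_chocolate_eating_competition.2 ∧ pvDiffWitnessOut_chocolate_eating_competition.1 ≠ pvDiffWitnessOut_chocolate_eating_competition.2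
def Claim_exact_chocolate_eating_competition : Prop := ∀ (n : Int) (x : Int) (y : Int), Dom_chocolate_eating_competition n x y → Pre_chocolate_eating_competition n x y → D_chocolate_eating_competition n x y → chocolate_eating_competition n x y ≠ chocolate_eating_competition_alt n x y

-- ===== LEMMAS AND PROOFS =====

-- number of subtraction steps of A's loop (1 ≤ x, 1 ≤ y)
def pvS (x y : Int) : Nat :=
  if h : 1 ≤ x ∧ 1 ≤ y then
    if x > y then 1 + pvS (x - y) y
    else if x = y then 1
    else 1 + pvS x (y - x)
  else 0
termination_by (x + y).toNat
decreasing_by all_goals omega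

-- pure round-robin bumping, k times starting at cur
def iterBump : List Int → Nat → Nat → List Int
  | eaters, _, 0 => eaters
  | eaters, cur, k+1 =>
    iterBump (eaters.set cur (eaters.getD cur 0 + 1))
      (if (cur : Int) ≥ (eaters.length : Int) - 1 then 0 else cur + 1) k

-- cursor advance of iterBump
def pvAdv (n : Nat) : Nat → Nat → Nat
  | cur, 0 => cur
  | cur, k+1 => pvAdv n (if (cur : Int) ≥ (n : Int) - 1 then 0 else cur + 1) k

theorem iterBump_length : ∀ (k : Nat) (xs : List Int) (cur : Nat),
    (iterBump xs cur k).length = xs.length := by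
  intro k
  induction k with
  | zero => intro xs cur; rfl
  | succ k ih => intro xs cur; simp [iterBump, ih]

theorem iterBump_add : ∀ (a b : Nat) (xs : List Int) (cur : Nat),
    iterBump xs cur (a + b) = iterBump (iterBump xs cur a) (pvAdv xs.length cur a) b := by
  intro a
  induction a with
  | zero => intro b xs cur; rw [Nat.zero_add]; rfl
  | succ a ih =>
    intro b xs cur
    rw [show a + 1 + b = (a + b) + 1 from by omega]
    simp only [iterBump, pvAdv, ih, List.length_set]

theorem pvAdv_mod : ∀ (n k cur : Nat), 1 ≤ n → cur < n → pvAdv n cur k = (cur + k) % n := by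
  intro n k
  induction k with
  | zero => intro cur h1 h2; simp [pvAdv, Nat.mod_eq_of_lt h2]
  | succ k ih =>
    intro cur h1 h2
    show pvAdv n (if (cur : Int) ≥ (n : Int) - 1 then 0 else cur + 1) k = _
    by_cases h : (cur : Int) ≥ (n : Int) - 1
    · have hc : cur = n - 1 := by omega
      rw [if_pos h, ih 0 h1 (by omega)]
      subst hc
      conv_rhs => rw [show n - 1 + (k + 1) = n + k by omega]
      simp [Nat.add_mod_left]
    · rw [if_neg h, ih (cur + 1) h1 (by omega)]
      congr 1; omega

theorem iterBump_getElem? : ∀ (k : Nat) (xs : List Int) (cur : Nat), cur + k ≤ xs.length →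
    ∀ (i : Nat), (iterBump xs cur k)[i]? =
      if cur ≤ i ∧ i < cur + k then (xs[i]?).map (· + 1) else xs[i]? := by
  intro k
  induction k with
  | zero =>
    intro xs cur h i
    rw [if_neg (by omega)]
    rfl
  | succ k ih =>
    intro xs cur h i
    have hcur : cur < xs.length := by omega
    have hget : xs.getD cur 0 = xs[cur] := by
      rw [List.getD_eq_getElem?_getD, List.getElem?_eq_getElem hcur]; rfl
    simp only [iterBump]
    by_cases hb : (cur : Int) ≥ (xs.length : Int) - 1
    · have hk : k = 0 := by omega
      subst hk
      rw [if_pos hb]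
      simp only [iterBump]
      rw [List.getElem?_set, hget]
      by_cases hi : cur = i
      · subst hi
        rw [if_pos rfl, if_pos hcur, if_pos (by omega), List.getElem?_eq_getElem hcur]
        rfl
      · rw [if_neg hi, if_neg (by omega)]
    · rw [if_neg hb]
      rw [ih _ _ (by rw [List.length_set]; omega) i]
      rw [List.getElem?_set, hget]
      by_cases hi : cur = i
      · subst hi
        rw [if_neg (by omega), if_pos rfl, if_pos hcur, if_pos (by omega),
          List.getElem?_eq_getElem hcur]
        rfl
      · rw [if_neg hi]
        by_cases hin : cur + 1 ≤ i ∧ i < cur + 1 + k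
        · rw [if_pos hin, if_pos (by omega)]
        · rw [if_neg hin, if_neg (by omega)]

theorem iterBump_full_round (xs : List Int) :
    iterBump xs 0 xs.length = xs.map (· + 1) := by
  have hlen : (iterBump xs 0 xs.length).length = (xs.map (· + 1)).length := by
    rw [iterBump_length, List.length_map]
  apply List.ext_getElem?
  intro i
  rw [iterBump_getElem? _ _ _ (by omega), List.getElem?_map]
  by_cases hi : i < xs.length
  · rw [if_pos (by omega)]
  · rw [if_neg (by omega), List.getElem?_eq_none (by omega)]
    rfl

theorem iterBump_rounds : ∀ (Q N : Nat), 1 ≤ N →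
    iterBump (List.replicate N (0 : Int)) 0 (N * Q) = List.replicate N (Q : Int) := by
  intro Q
  induction Q with
  | zero => intro N hN; rfl
  | succ Q ih =>
    intro N hN
    rw [show N * (Q + 1) = N * Q + N from by ring, iterBump_add,
      List.length_replicate, ih N hN,
      pvAdv_mod N (N * Q) 0 hN (by omega), Nat.zero_add, Nat.mul_mod_right]
    have h := iterBump_full_round (List.replicate N (Q : Int))
    rw [List.length_replicate] at h
    rw [h, List.map_replicate]
    congr 1

theorem iterBump_partial (N R : Nat) (q : Int) (h : R ≤ N) :
    iterBump (List.replicate N q) 0 R =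
      List.replicate R (q + 1) ++ List.replicate (N - R) q := by
  have hlen : (iterBump (List.replicate N q) 0 R).length =
      (List.replicate R (q + 1) ++ List.replicate (N - R) q).length := by
    rw [iterBump_length]
    simp only [List.length_append, List.length_replicate]
    omega
  apply List.ext_getElem?
  intro i
  rw [iterBump_getElem? _ _ _ (by rw [List.length_replicate]; omega)]
  simp only [List.getElem?_append, List.getElem?_replicate, List.length_replicate]
  split_ifs <;> first | rfl | omega

theorem pvS_pos (x y : Int) (hx : 1 ≤ x) (hy : 1 ≤ y) : 1 ≤ pvS x y := by
  rw [pvS, dif_pos ⟨hx, hy⟩]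
  split_ifs <;> omega

theorem pvS_le : ∀ (k : Nat) (x y : Int), (x + y).toNat ≤ k → 1 ≤ x → 1 ≤ y → pvS x y ≤ k := by
  intro k
  induction k with
  | zero => intro x y h hx hy; omega
  | succ k ih =>
    intro x y h hx hy
    rw [pvS, dif_pos ⟨hx, hy⟩]
    split_ifs with h1 h2
    · have := ih (x - y) y (by omega) (by omega) hy; omega
    · omega
    · have := ih x (y - x) (by omega) hx (by omega); omega

theorem pvS_self (y : Int) (hy : 1 ≤ y) : pvS y y = 1 := by
  rw [pvS, dif_pos ⟨hy, hy⟩, if_neg (by omega), if_pos rfl]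

theorem pvALoop_eq : ∀ (fuel : Nat) (x y : Int) (xs : List Int) (cur : Nat),
    1 ≤ x → 1 ≤ y → pvS x y ≤ fuel →
    pvALoop fuel x y xs cur = iterBump xs cur (pvS x y) := by
  intro fuel
  induction fuel with
  | zero =>
    intro x y xs cur hx hy hle
    have := pvS_pos x y hx hy
    omega
  | succ fuel ih =>
    intro x y xs cur hx hy hle
    rcases lt_trichotomy x y with hlt | heq | hgt
    · have hS : pvS x y = pvS x (y - x) + 1 := by
        rw [pvS, dif_pos ⟨hx, hy⟩, if_neg (by omega), if_neg (by omega)]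
        omega
      rw [hS]
      simp only [pvALoop, iterBump, if_neg (show ¬ x > y by omega)]
      rw [if_neg (show ¬ (x = 0 ∨ y - x = 0) by omega)]
      exact ih x (y - x) _ _ hx (by omega) (by omega)
    · subst heq
      have hS : pvS x x = 1 := pvS_self x hx
      rw [hS, show (1 : Nat) = 0 + 1 from rfl]
      simp only [pvALoop, iterBump, if_neg (show ¬ x > x by omega)]
      rw [if_pos (show x = 0 ∨ x - x = 0 by omega)]
    · have hS : pvS x y = pvS (x - y) y + 1 := by
        rw [pvS, dif_pos ⟨hx, hy⟩, if_pos hgt]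
        omega
      rw [hS]
      simp only [pvALoop, iterBump, if_pos (show x > y from hgt)]
      rw [if_neg (show ¬ (x - y = 0 ∨ y = 0) by omega)]
      exact ih (x - y) y _ _ (by omega) hy (by omega)

theorem pvS_div : ∀ (k : Nat) (x y : Int), x.toNat ≤ k → 1 ≤ y → y < x →
    (pvS x y : Int) = x / y + (if x % y = 0 then 0 else (pvS (x % y) y : Int)) := by
  intro k
  induction k with
  | zero => intro x y h hy hlt; omega
  | succ k ih =>
    intro x y h hy hlt
    have hx : 1 ≤ x := by omega
    have hS : pvS x y = 1 + pvS (x - y) y := by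
      rw [pvS, dif_pos ⟨hx, hy⟩, if_pos hlt]
    have hmod0 : 0 ≤ (x - y) % y := Int.emod_nonneg _ (by omega)
    have hmodlt : (x - y) % y < y := Int.emod_lt_of_pos _ (by omega)
    have hrec := Int.mul_ediv_add_emod (x - y) y
    have h6 := (Int.ediv_emod_unique (a := x) (b := y) (q := (x - y) / y + 1)
        (r := (x - y) % y) (by omega)).mpr
      ⟨by have : y * ((x - y) / y + 1) = y * ((x - y) / y) + y := by ring
          omega, hmod0, hmodlt⟩
    rcases lt_trichotomy (x - y) y with hc | hc | hc
    · -- x - y < y : one division step, remainder x - y ≥ 1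
      have hm : (x - y) % y = x - y := Int.emod_eq_of_lt (by omega) hc
      have hd : (x - y) / y = 0 := Int.ediv_eq_zero_of_lt (by omega) hc
      rw [hS, h6.1, h6.2, hm, hd, if_neg (by omega)]
      push_cast
      ring
    · -- x = 2y
      rw [hS, hc, pvS_self y hy, h6.1, h6.2, hc, Int.ediv_self (by omega),
        Int.emod_self, if_pos rfl]
      norm_num
    · -- x - y > y : induction
      have hIH := ih (x - y) y (by omega) hy hc
      rw [hS, h6.1, h6.2]
      push_cast
      push_cast at hIH
      rw [hIH]
      ring

theorem pvS_div2 : ∀ (k : Nat) (x y : Int), y.toNat ≤ k → 1 ≤ x → x ≤ y →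
    (pvS x y : Int) = y / x + (if y % x = 0 then 0 else (pvS x (y % x) : Int)) := by
  intro k
  induction k with
  | zero => intro x y h hx hle; omega
  | succ k ih =>
    intro x y h hx hle
    rcases eq_or_lt_of_le hle with heq | hlt
    · subst heq
      rw [pvS_self x hx, Int.ediv_self (by omega), Int.emod_self, if_pos rfl]
      norm_num
    · have hy : 1 ≤ y := by omega
      have hS : pvS x y = 1 + pvS x (y - x) := by
        rw [pvS, dif_pos ⟨hx, hy⟩, if_neg (by omega), if_neg (by omega)]
      have hmod0 : 0 ≤ (y - x) % x := Int.emod_nonneg _ (by omega)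
      have hmodlt : (y - x) % x < x := Int.emod_lt_of_pos _ (by omega)
      have h6 := (Int.ediv_emod_unique (a := y) (b := x) (q := (y - x) / x + 1)
          (r := (y - x) % x) (by omega)).mpr
        ⟨by have : x * ((y - x) / x + 1) = x * ((y - x) / x) + x := by ring
            have := Int.mul_ediv_add_emod (y - x) x
            omega, hmod0, hmodlt⟩
      rcases lt_trichotomy (y - x) x with hc | hc | hc
      · have hm : (y - x) % x = y - x := Int.emod_eq_of_lt (by omega) hc
        have hd : (y - x) / x = 0 := Int.ediv_eq_zero_of_lt (by omega) hc
        rw [hS, h6.1, h6.2, hm, hd, if_neg (by omega)]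
        push_cast
        ring
      · rw [hS, hc, pvS_self x hx, h6.1, h6.2, hc, Int.ediv_self (by omega),
          Int.emod_self, if_pos rfl]
        norm_num
      · have hIH := ih x (y - x) (by omega) hx (by omega)
        rw [hS, h6.1, h6.2]
        push_cast
        push_cast at hIH
        rw [hIH]
        ring

theorem pvBSteps_stop (fuel : Nat) (x y acc : Int) (h : ¬(x > 0 ∧ y > 0)) :
    pvBSteps fuel x y acc = acc := by
  cases fuel with
  | zero => rfl
  | succ f => simp [pvBSteps, h]

theorem pvBSteps_eq : ∀ (fuel : Nat) (x y acc : Int), 1 ≤ x → 1 ≤ y → pvS x y ≤ fuel →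
    pvBSteps fuel x y acc = acc + (pvS x y : Int) := by
  intro fuel
  induction fuel with
  | zero =>
    intro x y acc hx hy hle
    have := pvS_pos x y hx hy
    omega
  | succ fuel ih =>
    intro x y acc hx hy hle
    simp only [pvBSteps]
    rw [if_pos ⟨by omega, by omega⟩]
    by_cases hgt : x > y
    · rw [if_pos hgt, PySem.Int.mod_eq_emod_of_pos (by omega),
        PySem.Int.floordiv_eq_ediv_of_pos (by omega)]
      have hdiv := pvS_div x.toNat x y (le_refl _) hy hgt
      have hq : 1 ≤ x / y := by
        have h1 := Int.ediv_le_ediv (show (0 : Int) < y by omega) (show y ≤ x by omega)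
        rwa [Int.ediv_self (by omega)] at h1
      by_cases h0 : x % y = 0
      · rw [h0, pvBSteps_stop _ _ _ _ (by omega), hdiv, if_pos h0]
        ring
      · have hm1 : 1 ≤ x % y := by
          have := Int.emod_nonneg x (show y ≠ 0 by omega)
          omega
        rw [if_neg h0] at hdiv
        have hsle : pvS (x % y) y ≤ fuel := by omega
        rw [ih _ _ _ hm1 hy hsle, hdiv]
        ring
    · rw [if_neg hgt, PySem.Int.mod_eq_emod_of_pos (by omega),
        PySem.Int.floordiv_eq_ediv_of_pos (by omega)]
      have hdiv := pvS_div2 y.toNat x y (le_refl _) hx (by omega)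
      have hq : 1 ≤ y / x := by
        have h1 := Int.ediv_le_ediv (show (0 : Int) < x by omega) (show x ≤ y by omega)
        rwa [Int.ediv_self (by omega)] at h1
      by_cases h0 : y % x = 0
      · rw [h0, pvBSteps_stop _ _ _ _ (by omega), hdiv, if_pos h0]
        ring
      · have hm1 : 1 ≤ y % x := by
          have := Int.emod_nonneg y (show x ≠ 0 by omega)
          omega
        rw [if_neg h0] at hdiv
        have hsle : pvS x (y % x) ≤ fuel := by omega
        rw [ih _ _ _ hx hm1 hsle, hdiv]
        ring

theorem distrib (N s : Nat) (hN : 1 ≤ N) :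
    iterBump (List.replicate N (0 : Int)) 0 s =
      List.replicate (s % N) ((s / N : Nat) + 1 : Int) ++ List.replicate (N - s % N) ((s / N : Nat) : Int) := by
  have hmod := Nat.div_add_mod s N
  conv_lhs => rw [show s = N * (s / N) + s % N from hmod.symm]
  rw [iterBump_add, List.length_replicate, iterBump_rounds _ _ hN,
    pvAdv_mod N (N * (s / N)) 0 hN (by omega), Nat.zero_add, Nat.mul_mod_right]
  exact iterBump_partial N (s % N) _ (le_of_lt (Nat.mod_lt s (by omega)))

-- ===== VERDICT (by name: the statements are the Claim_ definitions above) =====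
theorem chocolate_eating_competition_spec : Claim_unchanged_chocolate_eating_competition := by
  unfold Claim_unchanged_chocolate_eating_competition
  intro n x y hdom hpre
  obtain ⟨hn, hxy⟩ := hpre
  unfold Spec_chocolate_eating_competition
  intro hnD
  unfold D_chocolate_eating_competition at hnD
  have hx : 1 ≤ x := by omega
  have hy : 1 ≤ y := by omega
  simp only [chocolate_eating_competition, chocolate_eating_competition_alt]
  have hfuel : pvS x y ≤ x.natAbs + y.natAbs + 1 := by
    have := pvS_le ((x + y).toNat) x y (le_refl _) hx hy
    omega
  rw [pvALoop_eq _ x y _ 0 hx hy hfuel]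
  rw [pvBSteps_eq _ x y 0 hx hy hfuel, zero_add]
  rw [show n = ((n.toNat : Nat) : Int) from by omega]
  rw [PySem.Int.floordiv_natCast, PySem.Int.mod_natCast]
  rw [Int.toNat_natCast]
  rw [show (((n.toNat : Nat) : Int) - ((pvS x y % n.toNat : Nat) : Int)).toNat
      = n.toNat - pvS x y % n.toNat from by omega]
  exact distrib n.toNat (pvS x y) (by omega)

theorem chocolate_eating_competition_changed : Claim_changed_chocolate_eating_competition := by
  unfold Claim_changed_chocolate_eating_competition; decide

theorem chocolate_eating_competition_tight : Claim_exact_chocolate_eating_competition := by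
  unfold Claim_exact_chocolate_eating_competition
  intro n x y hdom hpre hD
  obtain ⟨hn, hxy⟩ := hpre
  unfold D_chocolate_eating_competition at hD
  have hA : chocolate_eating_competition n x y =
      (List.replicate n.toNat (0 : Int)).set 0 ((List.replicate n.toNat (0 : Int)).getD 0 0 + 1) := by
    simp only [chocolate_eating_competition, pvALoop]
    by_cases hgt : x > y
    · rw [if_pos hgt, if_pos hgt, if_pos (show (x - y = 0 ∨ y = 0) by omega)]
    · rw [if_neg hgt, if_neg hgt, if_pos (show (x = 0 ∨ y - x = 0) by omega)]
  have hB : chocolate_eating_competition_alt n x y = List.replicate n.toNat 0 := by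
    simp only [chocolate_eating_competition_alt]
    rw [pvBSteps_stop _ _ _ _ (by omega),
      PySem.Int.floordiv_eq_ediv_of_pos (by omega), PySem.Int.mod_eq_emod_of_pos (by omega),
      Int.zero_ediv, Int.zero_emod]
    simp
  rw [hA, hB]
  intro h
  have h0 := congrArg (fun l => l[0]?) h
  have hlen : 0 < n.toNat := by omega
  simp [hlen] at h0
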